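-- pv_equiv track=rewrite | github.com/janskrz/comp_coding | euler/p_684.py | S_fast
-- ===== SOURCE A (Python) =====
-- mod 		= 1000000007
--
-- def S_fast(k):
-- 	k += 1
--
-- 	rest = k % 9
-- 	k = k - rest
-- 	n = k // 9
-- 	result = 5 * modular_power(10, n , mod) - 5 - (n * 9)
--
-- 	for i in range(1, rest+1):
-- 		result += i * modular_power(10, n, mod) - 1
--
-- 	return result % mod
--
-- def modular_power(base, exponent, modulus):
-- 	result = 1
-- 	while exponent > 0:
-- 		if exponent % 2 == 1:
-- 			result = (result * base) % modulus
-- 		exponent = int(exponent // 2)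
-- 		base = (base * base) % modulus
-- 	return result
-- ===== SOURCE B (Python) =====
-- mod = 1000000007
--
-- def S_fast(k):
--     k += 1
--     n, rest = divmod(k, 9)
--     return (_pow10(n) * (rest * rest + rest + 10) // 2 - k - 5) % mod
--
-- def _pow10(e):
--     if e <= 0:
--         return 1
--     h = _pow10(e // 2) ** 2 % mod
--     return h * 10 % mod if e % 2 else h
-- ===== Notes on version B (the rewrite author's own statement) =====
-- stated objective: simpler
-- what changed: B is a one-expression body: divmod splits k+1 into (n, rest), the residual for-loop and the 5*10^n-5-9n block-sum are merged algebraically into the single formula p*(rest^2+rest+10)//2 - (k+1) - 5, and the iterative binary powmod is replaced by a recursive square-and-multiply helper.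
import Mathlib
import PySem

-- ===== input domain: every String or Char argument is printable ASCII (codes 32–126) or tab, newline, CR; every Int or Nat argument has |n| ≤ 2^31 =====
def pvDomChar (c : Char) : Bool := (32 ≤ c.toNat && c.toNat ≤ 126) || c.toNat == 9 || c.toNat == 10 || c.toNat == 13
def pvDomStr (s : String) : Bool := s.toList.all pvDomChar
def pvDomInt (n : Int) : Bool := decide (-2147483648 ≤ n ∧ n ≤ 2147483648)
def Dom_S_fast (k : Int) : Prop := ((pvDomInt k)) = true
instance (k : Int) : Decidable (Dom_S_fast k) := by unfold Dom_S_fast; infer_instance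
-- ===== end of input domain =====

-- B: divmod split, one merged closed-form expression instead of the residual loop, recursive square-and-multiply powmod (simpler).

-- ===== PORT A =====
-- the module constant `mod`
def pyMod : Int := 1000000007

-- `while exponent > 0: …` of modular_power, state (result, base, exponent); fuel = exponent.toNat
-- bounds the iteration count (the exponent at least halves each turn), making the recursion structural
def mpLoop (fuel : Nat) (result base exponent modulus : Int) : Int :=
  match fuel with
  | 0 => result
  | fuel + 1 =>
    if exponent > 0 then
      mpLoop fuel
        (if PySem.Int.mod exponent 2 = 1 then PySem.Int.mod (result * base) modulus else result)
        (PySem.Int.mod (base * base) modulus)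
        (PySem.Int.floordiv exponent 2) modulus
    else result

def modular_power (base exponent modulus : Int) : Int :=
  mpLoop exponent.toNat 1 base exponent modulus

def S_fast (k : Int) : Int :=
  let k := k + 1
  let rest := PySem.Int.mod k 9
  let k := k - rest
  let n := PySem.Int.floordiv k 9
  let result := 5 * modular_power 10 n pyMod - 5 - (n * 9)
  let result := (PySem.List.pyRange 1 (rest + 1) 1).foldl
      (fun result i => result + (i * modular_power 10 n pyMod - 1)) result
  PySem.Int.mod result pyMod

-- ===== PORT B =====
-- recursive `_pow10` of Source B; fuel = e.toNat bounds the recursion depth (e at least halves)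
def pow10F (fuel : Nat) (e : Int) : Int :=
  match fuel with
  | 0 => 1
  | fuel + 1 =>
    if e ≤ 0 then 1
    else
      let h := PySem.Int.mod (pow10F fuel (PySem.Int.floordiv e 2) ^ 2) pyMod
      if PySem.Int.mod e 2 ≠ 0 then PySem.Int.mod (h * 10) pyMod else h

def pow10 (e : Int) : Int := pow10F e.toNat e

def S_fast_alt (k : Int) : Int :=
  let k := k + 1
  let n := PySem.Int.floordiv k 9          -- n, rest = divmod(k, 9)
  let rest := PySem.Int.mod k 9
  PySem.Int.mod (PySem.Int.floordiv (pow10 n * (rest * rest + rest + 10)) 2 - k - 5) pyMod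

-- ===== PRECONDITION & SPEC =====
def Spec_S_fast (k : Int) (out : Int) : Prop := out = S_fast_alt k
instance (k : Int) (out : Int) : Decidable (Spec_S_fast k out) := by unfold Spec_S_fast; infer_instance

-- ===== CLAIM (what is proved, stated in full; the proofs are below) =====
def Claim_equal_S_fast : Prop := ∀ (k : Int), Dom_S_fast k → Spec_S_fast k (S_fast k)

-- ===== LEMMAS AND PROOFS =====

-- A's exponentiation loop is congruent mod pyMod to result * base ^ exponent
theorem mpLoop_emod (fuel : Nat) (e r b : Int) (hf : e.toNat ≤ fuel) :
    mpLoop fuel r b e pyMod % pyMod = (r * b ^ e.toNat) % pyMod := by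
  induction fuel generalizing e r b with
  | zero =>
    have h0 : e.toNat = 0 := by omega
    simp [mpLoop, h0]
  | succ fuel ih =>
    rw [mpLoop]
    by_cases hpos : e > 0
    · rw [if_pos hpos]
      have hfd : PySem.Int.floordiv e 2 = e / 2 := PySem.Int.floordiv_eq_ediv_of_pos (by omega)
      have hm : PySem.Int.mod e 2 = e % 2 := PySem.Int.mod_eq_emod_of_pos (by omega)
      have hfuel : (PySem.Int.floordiv e 2).toNat ≤ fuel := by rw [hfd]; omega
      rw [ih _ _ _ hfuel]
      have h2 : Int.ModEq pyMod (PySem.Int.mod (b * b) pyMod) (b * b) := by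
        rw [PySem.Int.mod_eq_emod_of_pos (show (0:Int) < pyMod by norm_num [pyMod])]
        exact Int.emod_emod_of_dvd _ dvd_rfl
      set k := (PySem.Int.floordiv e 2).toNat with hk
      have hk2 : k = (e / 2).toNat := by rw [hk, hfd]
      by_cases hodd : e % 2 = 1
      · rw [if_pos (by rw [hm]; exact hodd)]
        have h1 : Int.ModEq pyMod (PySem.Int.mod (r * b) pyMod) (r * b) := by
          rw [PySem.Int.mod_eq_emod_of_pos (show (0:Int) < pyMod by norm_num [pyMod])]
          exact Int.emod_emod_of_dvd _ dvd_rfl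
        have he : e.toNat = 2 * k + 1 := by rw [hk2]; omega
        have key := h1.mul (h2.pow k)
        have heq : (r * b) * (b * b) ^ k = r * b ^ (2 * k + 1) := by ring
        rw [he]
        exact heq ▸ key
      · rw [if_neg (by rw [hm]; exact hodd)]
        have he : e.toNat = 2 * k := by rw [hk2]; omega
        have key := (Int.ModEq.refl (n := pyMod) r).mul (h2.pow k)
        have heq : r * (b * b) ^ k = r * b ^ (2 * k) := by ring
        rw [he]
        exact heq ▸ key
    · rw [if_neg hpos]
      have h0 : e.toNat = 0 := by omega
      simp [h0]

-- B's recursive helper is congruent mod pyMod to 10 ^ e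
theorem pow10F_emod (fuel : Nat) (e : Int) (hf : e.toNat ≤ fuel) :
    pow10F fuel e % pyMod = (10 : Int) ^ e.toNat % pyMod := by
  induction fuel generalizing e with
  | zero =>
    have h0 : e.toNat = 0 := by omega
    simp [pow10F, h0]
  | succ fuel ih =>
    rw [pow10F]
    by_cases hle : e ≤ 0
    · rw [if_pos hle]
      have h0 : e.toNat = 0 := by omega
      simp [h0]
    · rw [if_neg hle]
      have hfd : PySem.Int.floordiv e 2 = e / 2 := PySem.Int.floordiv_eq_ediv_of_pos (by omega)
      have hm : PySem.Int.mod e 2 = e % 2 := PySem.Int.mod_eq_emod_of_pos (by omega)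
      have hfuel : (PySem.Int.floordiv e 2).toNat ≤ fuel := by rw [hfd]; omega
      set k := (PySem.Int.floordiv e 2).toNat with hk
      have hk2 : k = (e / 2).toNat := by rw [hk, hfd]
      have hq : Int.ModEq pyMod (pow10F fuel (PySem.Int.floordiv e 2)) ((10 : Int) ^ k) :=
        ih _ hfuel
      have hh : Int.ModEq pyMod (PySem.Int.mod (pow10F fuel (PySem.Int.floordiv e 2) ^ 2) pyMod)
          ((10 : Int) ^ (2 * k)) := by
        have hsq := hq.pow 2
        have hpm : ((10 : Int) ^ k) ^ 2 = (10 : Int) ^ (2 * k) := by rw [← pow_mul]; ring_nf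
        rw [hpm] at hsq
        refine Int.ModEq.trans ?_ hsq
        rw [PySem.Int.mod_eq_emod_of_pos (show (0:Int) < pyMod by norm_num [pyMod])]
        exact Int.emod_emod_of_dvd _ dvd_rfl
      by_cases hodd : e % 2 = 0
      · rw [if_neg (by rw [hm]; simpa using hodd)]
        have he : e.toNat = 2 * k := by rw [hk2]; omega
        rw [he]
        exact hh
      · rw [if_pos (by rw [hm]; simpa using hodd)]
        have he : e.toNat = 2 * k + 1 := by rw [hk2]; omega
        rw [he]
        have key := hh.mul_right 10
        have heq : (10 : Int) ^ (2 * k) * 10 = (10 : Int) ^ (2 * k + 1) := by ring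
        rw [heq] at key
        refine Int.ModEq.trans ?_ key
        rw [PySem.Int.mod_eq_emod_of_pos (show (0:Int) < pyMod by norm_num [pyMod])]
        exact Int.emod_emod_of_dvd _ dvd_rfl

-- A's residual loop, in closed form
theorem loop_closed_form (rest p base : Int) (h0 : 0 ≤ rest) (h9 : rest < 9) :
    (PySem.List.pyRange 1 (rest + 1) 1).foldl (fun result i => result + (i * p - 1)) base
      = base + p * (PySem.Int.floordiv (rest * (rest + 1)) 2) - rest := by
  interval_cases rest <;>
    simp [PySem.List.pyRange, PySem.Int.floordiv, List.range_succ] <;> ring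

-- ===== VERDICT (by name: the statement is the Claim_ definition above) =====
theorem S_fast_spec : Claim_equal_S_fast := by
  unfold Claim_equal_S_fast Spec_S_fast
  intro k0 _
  unfold S_fast S_fast_alt modular_power pow10
  simp only []
  set t := k0 + 1 with ht
  have hm9 : PySem.Int.mod t 9 = t % 9 := PySem.Int.mod_eq_emod_of_pos (by norm_num)
  have hfdA : PySem.Int.floordiv (t - PySem.Int.mod t 9) 9 = t / 9 := by
    rw [hm9, PySem.Int.floordiv_eq_ediv_of_pos (by norm_num)]; omega
  have hfdB : PySem.Int.floordiv t 9 = t / 9 := PySem.Int.floordiv_eq_ediv_of_pos (by norm_num)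
  rw [hfdA, hfdB, hm9]
  rw [loop_closed_form (t % 9) _ _ (by omega) (by omega)]
  -- relate the two modular exponentiations
  have hp : mpLoop (t / 9).toNat 1 10 (t / 9) pyMod % pyMod = pow10F (t / 9).toNat (t / 9) % pyMod := by
    rw [mpLoop_emod _ _ _ _ le_rfl, pow10F_emod _ _ le_rfl, one_mul]
  obtain ⟨d, hd⟩ : pyMod ∣ (pow10F (t / 9).toNat (t / 9) - mpLoop (t / 9).toNat 1 10 (t / 9) pyMod) :=
    Int.ModEq.dvd hp
  set pA := mpLoop (t / 9).toNat 1 10 (t / 9) pyMod with hpA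
  set pB := pow10F (t / 9).toNat (t / 9) with hpB
  rw [PySem.Int.mod_eq_emod_of_pos (show (0:Int) < pyMod by norm_num [pyMod]),
      PySem.Int.mod_eq_emod_of_pos (show (0:Int) < pyMod by norm_num [pyMod]),
      PySem.Int.floordiv_eq_ediv_of_pos (show (0:Int) < 2 by norm_num),
      PySem.Int.floordiv_eq_ediv_of_pos (show (0:Int) < 2 by norm_num)]
  have hq : t = 9 * (t / 9) + t % 9 := by omega
  generalize hr : t % 9 = r at *
  generalize t / 9 = q at *
  have hr0 : 0 ≤ r := by omega
  have hr9 : r < 9 := by omega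
  simp only [pyMod] at hd ⊢
  interval_cases r <;> omega
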